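-- pv_equiv track=rewrite | github.com/Kjiw0n/Algorithm | programmers/가장 많이 받은 선물.py | solution
-- ===== SOURCE A (Python) =====
-- def solution(friends, gifts):
--     friends_dict = {friend: k for k, friend in enumerate(friends)}
--     N = len(friends)
--     graph = [[0] * N for _ in range(N)]  # 주고받은 선물
--     graph2 = [0] * N  # 선물 지수
--     gifts = [gift.split() for gift in gifts]
--     for a, b in gifts:
--         ai = friends_dict[a]
--         bi = friends_dict[b]
--         graph[ai][bi] += 1
--         graph2[ai] += 1
--         graph2[bi] -= 1
--
--     ans = [0] * N
--     for i in range(N):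
--         # i가 받을 선물의 개수 계산하기
--         for j in range(N):
--             # i와 j가 주고받은 기록 있는 지 체크
--             if graph[i][j] == graph[j][i]:
--                 # 주고받은 기록이 없거나 주고받은 수가 같다면 -> 선물 지수 작은 사람 -> 선물 지수 큰 사람
--                 if graph2[i] > graph2[j]:
--                     ans[i] += 1
--                 elif graph2[i] < graph2[j]:
--                     ans[j] += 1
--             else:
--                 # 주고받은 기록이 있다면, 더 많이 준 사람이 받음
--                 if graph[i][j] > graph[j][i]:
--                     # i가 더 많이 줌
--                     ans[i] += 1
--                 else:  # 같은 경우는 어차피 위에서 걸러진다.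
--                     ans[j] += 1
--
--     return max(ans) // 2
-- ===== SOURCE B (Python) =====
-- def solution(friends, gifts):
--     n = len(friends)
--     idx = {f: k for k, f in enumerate(friends)}
--     gi = [0] * n                       # gift index: given - received
--     cnt = {}                           # directed exchange counts, sparse
--     for gift in gifts:
--         a, b = gift.split()
--         ai, bi = idx[a], idx[b]
--         gi[ai] += 1
--         gi[bi] -= 1
--         cnt[(ai, bi)] = cnt.get((ai, bi), 0) + 1
--     # base wins: rank by gift index = number of people with strictly smaller index
--     svals = sorted(gi)
--     first = {}
--     for pos, v in enumerate(svals):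
--         if v not in first:
--             first[v] = pos
--     wins = [first[gi[i]] for i in range(n)]
--     # corrections: only pairs that actually exchanged, with unequal directed counts
--     for (i, j) in cnt:
--         if i > j and (j, i) in cnt:
--             continue                   # this unordered pair is handled from its other key
--         cij = cnt.get((i, j), 0)
--         cji = cnt.get((j, i), 0)
--         if cij != cji:
--             if gi[i] > gi[j]:
--                 wins[i] -= 1
--             elif gi[j] > gi[i]:
--                 wins[j] -= 1
--             if cij > cji:
--                 wins[i] += 1
--             else:
--                 wins[j] += 1
--     return max(wins)
-- ===== Notes on version B (the rewrite author's own statement) =====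
-- stated objective: alternative
-- what changed: Instead of A's O(N^2) all-pairs loop over a dense N x N exchange matrix (each unordered pair judged twice, answer max//2), B sorts the gift indices once to get each person's wins against everyone by rank (count of strictly smaller indices, via a first-occurrence-position dict) and then corrects only the pairs that actually exchanged gifts unequally, using a sparse counter of directed pairs, taking the max of per-person win counts directly; this is O(N log N + G) work but a timing run could not measure a speedup.
import Mathlib
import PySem

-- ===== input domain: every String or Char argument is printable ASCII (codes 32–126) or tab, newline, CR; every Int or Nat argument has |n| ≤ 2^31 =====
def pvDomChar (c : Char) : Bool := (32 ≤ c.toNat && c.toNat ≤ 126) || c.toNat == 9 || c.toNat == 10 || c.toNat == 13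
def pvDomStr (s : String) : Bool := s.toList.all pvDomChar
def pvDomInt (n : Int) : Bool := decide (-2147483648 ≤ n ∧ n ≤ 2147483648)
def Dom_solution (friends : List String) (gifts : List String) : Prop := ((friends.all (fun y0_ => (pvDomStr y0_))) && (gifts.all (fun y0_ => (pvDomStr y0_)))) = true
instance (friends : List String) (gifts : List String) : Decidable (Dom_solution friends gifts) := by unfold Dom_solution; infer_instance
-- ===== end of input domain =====

-- B replaces A's all-pairs comparison over a dense N x N matrix by sorted
-- gift-index ranks plus corrections only on pairs that actually exchanged gifts
-- (objective: alternative algorithm, O(N log N + G) work instead of O(N^2 + G);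
-- a timing run could not measure this, so no measured speedup is claimed).

-- ===== PORT A =====
-- friends_dict = {friend: k for k, friend in enumerate(friends)}
def pvFriendsDict (friends : List String) : PySem.Dict String Int :=
  (PySem.List.enumerate friends 0).foldl (fun d p => d.insert p.2 p.1) PySem.Dict.empty

-- one iteration of A's gift loop over the pre-split gifts;
-- `none` = KeyError (name not in friends_dict) or unpack ValueError — excluded by Pre_.
-- The dict values ai, bi are enumerate positions, hence nonnegative: `.toNat` is exact.
def pvAGift (fd : PySem.Dict String Int)
    (st : Option (List (List Int) × List Int)) (toks : List String) :
    Option (List (List Int) × List Int) :=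
  match st with
  | none => none
  | some (graph, graph2) =>
    match toks with
    | [a, b] =>
      match fd.get? a, fd.get? b with
      | some ai, some bi =>
          some (graph.modify ai.toNat (fun row => row.modify bi.toNat (· + 1)),
                (graph2.modify ai.toNat (· + 1)).modify bi.toNat (· - 1))
      | _, _ => none
    | _ => none

-- body of A's double comparison loop (i, j come from range(N), hence nonnegative)
def pvABody (graph : List (List Int)) (graph2 : List Int) (i : Int) (ans : List Int) (j : Int) :
    List Int :=
  if (graph.getD i.toNat []).getD j.toNat 0 = (graph.getD j.toNat []).getD i.toNat 0 then
    if graph2.getD j.toNat 0 < graph2.getD i.toNat 0 then ans.modify i.toNat (· + 1)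
    else if graph2.getD i.toNat 0 < graph2.getD j.toNat 0 then ans.modify j.toNat (· + 1)
    else ans
  else
    if (graph.getD j.toNat []).getD i.toNat 0 < (graph.getD i.toNat []).getD j.toNat 0 then
      ans.modify i.toNat (· + 1)
    else ans.modify j.toNat (· + 1)

def solution (friends : List String) (gifts : List String) : Int :=
  let fd := pvFriendsDict friends
  let N := friends.length
  match (gifts.map PySem.Str.split₀).foldl (pvAGift fd)
      (some (List.replicate N (List.replicate N 0), List.replicate N 0)) with
  | none => 0   -- an exception in the gift loop: outside Pre_
  | some (graph, graph2) =>
    let ans := (PySem.List.pyRange 0 (N : Int) 1).foldl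
      (fun ans i => (PySem.List.pyRange 0 (N : Int) 1).foldl (pvABody graph graph2 i) ans)
      (List.replicate N 0)
    match PySem.List.max? ans (fun x => x) with
    | some m => PySem.Int.floordiv m 2
    | none => 0   -- max([]) ValueError (friends = []): outside Pre_

-- ===== PORT B =====
-- one iteration of B's gift loop: gift index updates + sparse directed pair counter;
-- `none` = KeyError / unpack ValueError, as in A — excluded by Pre_.
def pvBGift (idx : PySem.Dict String Int)
    (st : Option (List Int × PySem.Dict (Int × Int) Int)) (gift : String) :
    Option (List Int × PySem.Dict (Int × Int) Int) :=
  match st with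
  | none => none
  | some (gi, cnt) =>
    match PySem.Str.split₀ gift with
    | [a, b] =>
      match idx.get? a, idx.get? b with
      | some ai, some bi =>
          some ((gi.modify ai.toNat (· + 1)).modify bi.toNat (· - 1),
                cnt.modify (ai, bi) 0 (· + 1))
      | _, _ => none
    | _ => none

-- first-occurrence positions in the sorted list: `if v not in first: first[v] = pos`
def pvFirst (svals : List Int) : PySem.Dict Int Int :=
  (PySem.List.enumerate svals 0).foldl
    (fun first p => if first.contains p.2 then first else first.insert p.2 p.1) PySem.Dict.empty

-- one correction step of B's loop over cnt's keys
def pvCorr (gi : List Int) (cnt : PySem.Dict (Int × Int) Int) (wins : List Int) (p : Int × Int) :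
    List Int :=
  if p.2 < p.1 ∧ cnt.contains (p.2, p.1) then wins
  else
    let cij := cnt.getD (p.1, p.2) 0
    let cji := cnt.getD (p.2, p.1) 0
    if cij ≠ cji then
      let wins1 :=
        if gi.getD p.2.toNat 0 < gi.getD p.1.toNat 0 then wins.modify p.1.toNat (· - 1)
        else if gi.getD p.1.toNat 0 < gi.getD p.2.toNat 0 then wins.modify p.2.toNat (· - 1)
        else wins
      if cji < cij then wins1.modify p.1.toNat (· + 1) else wins1.modify p.2.toNat (· + 1)
    else wins

def solution_alt (friends : List String) (gifts : List String) : Int :=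
  let n := friends.length
  let idx := pvFriendsDict friends
  match gifts.foldl (pvBGift idx) (some (List.replicate n 0, PySem.Dict.empty)) with
  | none => 0   -- an exception in the gift loop: outside Pre_
  | some (gi, cnt) =>
    let svals := PySem.List.sorted gi (fun x => x)
    let first := pvFirst svals
    -- first[gi[i]]: the key gi[i] is always present (gi[i] ∈ svals, a permutation of gi),
    -- so Python's lookup never raises and getD is exact here
    let wins := (PySem.List.pyRange 0 (n : Int) 1).map
      (fun i => first.getD (gi.getD i.toNat 0) 0)
    let wins := cnt.keys.foldl (pvCorr gi cnt) wins
    match PySem.List.max? wins (fun x => x) with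
    | some m => m
    | none => 0   -- max([]) ValueError (friends = []): outside Pre_

-- ===== PRECONDITION & SPEC =====
-- Pre_ excludes exactly the inputs where A raises: friends = [] (max of an empty list,
-- ValueError) and any gift that does not split into exactly two names from friends
-- (unpack ValueError / dict KeyError).
def Pre_solution (friends : List String) (gifts : List String) : Prop :=
  friends ≠ [] ∧ ∀ g ∈ gifts,
    (PySem.Str.split₀ g).length = 2 ∧
    (PySem.Str.split₀ g).getD 0 "" ∈ friends ∧
    (PySem.Str.split₀ g).getD 1 "" ∈ friends
instance (friends : List String) (gifts : List String) : Decidable (Pre_solution friends gifts) := by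
  unfold Pre_solution; infer_instance

def pvWitness_solution : List String × List String := (["muzi", "ryan"], ["muzi ryan", "ryan muzi", "muzi ryan"])

def Spec_solution (friends : List String) (gifts : List String) (out : Int) : Prop :=
  out = solution_alt friends gifts
instance (friends : List String) (gifts : List String) (out : Int) :
    Decidable (Spec_solution friends gifts out) := by unfold Spec_solution; infer_instance

-- ===== CLAIM (what is proved, stated in full; the proofs are below) =====
def Claim_equal_solution : Prop := ∀ (friends : List String) (gifts : List String),
  Dom_solution friends gifts → Pre_solution friends gifts →
  Spec_solution friends gifts (solution friends gifts)

-- ===== LEMMAS AND PROOFS =====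

-- proof-side abstractions: the list of (giver, receiver) index pairs and statistics over it

def pvCast (p : Nat × Nat) : Int × Int := ((p.1 : Int), (p.2 : Int))

def pvPair (fd : PySem.Dict String Int) (g : String) : Nat × Nat :=
  (((fd.get? ((PySem.Str.split₀ g).getD 0 "")).getD 0).toNat,
   ((fd.get? ((PySem.Str.split₀ g).getD 1 "")).getD 0).toNat)

def pvPairs (friends gifts : List String) : List (Nat × Nat) :=
  gifts.map (pvPair (pvFriendsDict friends))

def pvC (ps : List (Nat × Nat)) (u v : Nat) : Nat := ps.count (u, v)

def pvD (ps : List (Nat × Nat)) (u : Nat) : Int :=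
  (ps.countP (fun p => p.1 == u) : Int) - (ps.countP (fun p => p.2 == u) : Int)

def pvBt (ps : List (Nat × Nat)) (u v : Nat) : Bool :=
  if pvC ps u v = pvC ps v u then decide (pvD ps v < pvD ps u)
  else decide (pvC ps v u < pvC ps u v)

def pvW (ps : List (Nat × Nat)) (n k : Nat) : Int :=
  ∑ j ∈ Finset.range n, (if pvBt ps k j then 1 else 0)

def pvBase (ps : List (Nat × Nat)) (n k : Nat) : Int :=
  ∑ j ∈ Finset.range n, (if pvD ps j < pvD ps k then 1 else 0)

def pvDelta (ps : List (Nat × Nat)) (k j : Nat) : Int :=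
  if pvC ps k j = pvC ps j k then 0
  else (if pvC ps j k < pvC ps k j then 1 else 0) - (if pvD ps j < pvD ps k then 1 else 0)

def pvDB (ps : List (Nat × Nat)) (u v k : Nat) : Int :=
  if v < u ∧ (v, u) ∈ ps then 0
  else if pvC ps u v = pvC ps v u then 0
  else (if pvC ps v u < pvC ps u v then (if u = k then 1 else 0) else (if v = k then 1 else 0))
     - (if pvD ps v < pvD ps u then (if u = k then 1 else 0)
        else if pvD ps u < pvD ps v then (if v = k then 1 else 0) else 0)

def pvStepG (G : List (List Int)) (p : Nat × Nat) : List (List Int) :=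
  G.modify p.1 (fun row => row.modify p.2 (· + 1))

def pvStepZ (z : List Int) (p : Nat × Nat) : List Int :=
  (z.modify p.1 (· + 1)).modify p.2 (· - 1)

def pvStepC (d : PySem.Dict (Int × Int) Int) (p : Nat × Nat) : PySem.Dict (Int × Int) Int :=
  d.modify (pvCast p) 0 (· + 1)

-- basic tools -----------------------------------------------------------------

theorem pvGetD_modify {α : Type} (l : List α) (i : Nat) (f : α → α) (j : Nat) (d : α) :
    (l.modify i f).getD j d = if i = j ∧ j < l.length then f (l.getD j d) else l.getD j d := by
  simp only [List.getD_eq_getElem?_getD, List.getElem?_modify]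
  by_cases hj : j < l.length
  · rw [List.getElem?_eq_getElem hj]
    by_cases hij : i = j <;> simp [hij, hj]
  · rw [List.getElem?_eq_none (by omega)]
    simp [hj]

theorem pvCast_inj : Function.Injective pvCast := by
  intro p q h
  simp only [pvCast, Prod.mk.injEq] at h
  exact Prod.ext (by exact_mod_cast h.1) (by exact_mod_cast h.2)

theorem pvSum_range_list (n : Nat) (f : Nat → Int) :
    ((List.range n).map f).sum = ∑ j ∈ Finset.range n, f j := rfl

-- the friends dict ------------------------------------------------------------

theorem pvFd_frozen (fs : List String) (s0 : Int) (d0 : PySem.Dict String Int) (s : String)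
    (h : s ∉ fs) :
    ((PySem.List.enumerate fs s0).foldl (fun d p => d.insert p.2 p.1) d0).get? s = d0.get? s := by
  induction fs generalizing s0 d0 with
  | nil => simp [PySem.List.enumerate_nil]
  | cons x t ih =>
      rw [PySem.List.enumerate_cons]
      simp only [List.foldl_cons]
      rw [ih _ _ (fun hm => h (List.mem_cons_of_mem _ hm))]
      exact PySem.Dict.get?_insert_of_ne d0 _ (fun he => h (he ▸ List.mem_cons_self))

theorem pvFd_mem (fs : List String) (s0 : Int) (d0 : PySem.Dict String Int) (s : String)
    (h : s ∈ fs) :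
    ∃ u : Nat, u < fs.length ∧
      ((PySem.List.enumerate fs s0).foldl (fun d p => d.insert p.2 p.1) d0).get? s
        = some (s0 + (u : Int)) := by
  induction fs generalizing s0 d0 with
  | nil => cases h
  | cons x t ih =>
      rw [PySem.List.enumerate_cons]
      simp only [List.foldl_cons]
      by_cases ht : s ∈ t
      · obtain ⟨u, hu, he⟩ := ih (s0 + 1) (d0.insert x s0) ht
        exact ⟨u + 1, by simpa using Nat.succ_lt_succ hu, by rw [he]; congr 1; push_cast; ring⟩
      · have hsx : s = x := by rcases List.mem_cons.mp h with h1 | h2; exact h1; exact absurd h2 ht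
        refine ⟨0, Nat.succ_pos _, ?_⟩
        rw [pvFd_frozen t (s0 + 1) _ s ht, hsx]
        rw [PySem.Dict.get?_insert_self]
        norm_num



-- gift-loop translation: under Pre_, both Option folds succeed and compute plain
-- folds over the same index-pair list pvPairs --------------------------------

theorem pvGift_parts (friends : List String) (g : String)
    (hlen : (PySem.Str.split₀ g).length = 2)
    (ha : (PySem.Str.split₀ g).getD 0 "" ∈ friends)
    (hb : (PySem.Str.split₀ g).getD 1 "" ∈ friends) :
    ∃ (a b : String) (ua ub : Nat), PySem.Str.split₀ g = [a, b] ∧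
      ua < friends.length ∧ ub < friends.length ∧
      (pvFriendsDict friends).get? a = some (ua : Int) ∧
      (pvFriendsDict friends).get? b = some (ub : Int) ∧
      pvPair (pvFriendsDict friends) g = (ua, ub) := by
  obtain ⟨ua, hua, hga⟩ := pvFd_mem friends 0 PySem.Dict.empty _ ha
  obtain ⟨ub, hub, hgb⟩ := pvFd_mem friends 0 PySem.Dict.empty _ hb
  rcases hsp : PySem.Str.split₀ g with _ | ⟨a, _ | ⟨b, _ | ⟨c, t⟩⟩⟩ <;> rw [hsp] at hlen <;>
    simp at hlen
  rw [hsp] at ha hb hga hgb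
  simp only [List.getD_cons_zero, List.getD_cons_succ] at ha hb hga hgb
  rw [zero_add] at hga hgb
  refine ⟨a, b, ua, ub, rfl, hua, hub, ?_, ?_, ?_⟩
  · simpa [pvFriendsDict] using hga
  · simpa [pvFriendsDict] using hgb
  · simp [pvPair, pvFriendsDict, hsp]
    rw [hga, hgb]
    simp

theorem pvAGift_fold (friends gifts : List String)
    (hp : ∀ g ∈ gifts, (PySem.Str.split₀ g).length = 2 ∧
      (PySem.Str.split₀ g).getD 0 "" ∈ friends ∧ (PySem.Str.split₀ g).getD 1 "" ∈ friends) :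
    ∀ st : List (List Int) × List Int,
      (gifts.map PySem.Str.split₀).foldl (pvAGift (pvFriendsDict friends)) (some st)
        = some ((pvPairs friends gifts).foldl
            (fun st p => (pvStepG st.1 p, pvStepZ st.2 p)) st) := by
  induction gifts with
  | nil => intro st; simp [pvPairs]
  | cons g gs ih =>
      intro st
      obtain ⟨hlen, ha, hb⟩ := hp g List.mem_cons_self
      obtain ⟨a, b, ua, ub, hsp, hua, hub, hga, hgb, hpair⟩ := pvGift_parts friends g hlen ha hb
      have hstep : pvAGift (pvFriendsDict friends) (some st) (PySem.Str.split₀ g)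
          = some (pvStepG st.1 (pvPair (pvFriendsDict friends) g),
                  pvStepZ st.2 (pvPair (pvFriendsDict friends) g)) := by
        rw [hsp]
        simp only [pvAGift]
        rw [hga, hgb, hpair]
        simp [pvStepG, pvStepZ]
      simp only [List.map_cons, List.foldl_cons, hstep, pvPairs, List.map_cons]
      exact ih (fun g hg => hp g (List.mem_cons_of_mem _ hg)) _

theorem pvBGift_fold (friends gifts : List String)
    (hp : ∀ g ∈ gifts, (PySem.Str.split₀ g).length = 2 ∧
      (PySem.Str.split₀ g).getD 0 "" ∈ friends ∧ (PySem.Str.split₀ g).getD 1 "" ∈ friends) :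
    ∀ st : List Int × PySem.Dict (Int × Int) Int,
      gifts.foldl (pvBGift (pvFriendsDict friends)) (some st)
        = some ((pvPairs friends gifts).foldl
            (fun st p => (pvStepZ st.1 p, pvStepC st.2 p)) st) := by
  induction gifts with
  | nil => intro st; simp [pvPairs]
  | cons g gs ih =>
      intro st
      obtain ⟨hlen, ha, hb⟩ := hp g List.mem_cons_self
      obtain ⟨a, b, ua, ub, hsp, hua, hub, hga, hgb, hpair⟩ := pvGift_parts friends g hlen ha hb
      have hstep : pvBGift (pvFriendsDict friends) (some st) g
          = some (pvStepZ st.1 (pvPair (pvFriendsDict friends) g),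
                  pvStepC st.2 (pvPair (pvFriendsDict friends) g)) := by
        simp only [pvBGift]
        rw [hsp]
        simp [hga, hgb, hpair, pvStepZ, pvStepC, pvCast]
      simp only [List.foldl_cons, hstep, pvPairs, List.map_cons]
      exact ih (fun g hg => hp g (List.mem_cons_of_mem _ hg)) _

theorem pvPairs_lt (friends gifts : List String)
    (hp : ∀ g ∈ gifts, (PySem.Str.split₀ g).length = 2 ∧
      (PySem.Str.split₀ g).getD 0 "" ∈ friends ∧ (PySem.Str.split₀ g).getD 1 "" ∈ friends) :
    ∀ p ∈ pvPairs friends gifts, p.1 < friends.length ∧ p.2 < friends.length := by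
  intro p hpmem
  obtain ⟨g, hg, rfl⟩ := List.mem_map.mp hpmem
  obtain ⟨hlen, ha, hb⟩ := hp g hg
  obtain ⟨ua, hua, hga⟩ := pvFd_mem friends 0 PySem.Dict.empty _ ha
  obtain ⟨ub, hub, hgb⟩ := pvFd_mem friends 0 PySem.Dict.empty _ hb
  simp only [pvPair, pvFriendsDict] at *
  rw [hga, hgb]
  simpa using ⟨hua, hub⟩


-- data-structure characterizations ------------------------------------------

theorem pvZ_len (ps : List (Nat × Nat)) (z : List Int) :
    (ps.foldl pvStepZ z).length = z.length := by
  induction ps generalizing z with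
  | nil => rfl
  | cons p t ih => simp [List.foldl_cons, ih, pvStepZ]

theorem pvZ_entry (ps : List (Nat × Nat)) (z : List Int) (n : Nat) (hz : z.length = n)
    (hps : ∀ p ∈ ps, p.1 < n ∧ p.2 < n) (u : Nat) (hu : u < n) :
    (ps.foldl pvStepZ z).getD u 0 =
      z.getD u 0 + (ps.countP (fun p => p.1 == u) : Int) - (ps.countP (fun p => p.2 == u) : Int) := by
  induction ps generalizing z with
  | nil => simp
  | cons p t ih =>
      obtain ⟨h1, h2⟩ := hps p List.mem_cons_self
      rw [List.foldl_cons, ih (pvStepZ z p) (by simp [pvStepZ, hz])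
        (fun q hq => hps q (List.mem_cons_of_mem _ hq))]
      have he : (pvStepZ z p).getD u 0
          = z.getD u 0 + (if p.1 = u then 1 else 0) - (if p.2 = u then 1 else 0) := by
        simp only [pvStepZ]
        rw [pvGetD_modify, pvGetD_modify]
        by_cases ha : p.1 = u <;> by_cases hb : p.2 = u <;>
          simp [ha, hb, hz, hu, List.length_modify] <;> ring
      rw [he]
      by_cases ha : p.1 = u <;> by_cases hb : p.2 = u <;>
        simp [List.countP_cons, ha, hb] <;> push_cast <;> ring

theorem pvG_entry (ps : List (Nat × Nat)) (G : List (List Int)) (n : Nat)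
    (hG : G.length = n) (hrows : ∀ r ∈ G, r.length = n)
    (u v : Nat) (hu : u < n) (hv : v < n) :
    ((ps.foldl pvStepG G).getD u []).getD v 0 =
      (G.getD u []).getD v 0 + (ps.count (u, v) : Int) := by
  induction ps generalizing G with
  | nil => simp
  | cons p t ih =>
      rw [List.foldl_cons,
        ih (pvStepG G p) (by simp [pvStepG, hG])
          (by intro r hr
              simp only [pvStepG] at hr
              obtain ⟨j, hj, rfl⟩ := List.mem_iff_getElem.mp hr
              have hj' : j < G.length := by simpa using hj
              have := List.getElem?_modify (fun row => row.modify p.2 (· + 1)) p.1 G j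
              rw [List.getElem?_eq_getElem hj, List.getElem?_eq_getElem hj'] at this
              simp at this
              rw [this]
              by_cases hij : p.1 = j <;>
                simp [hij, hrows _ (List.getElem_mem hj')])]
      have he : ((pvStepG G p).getD u []).getD v 0
          = (G.getD u []).getD v 0 + (if p = (u, v) then 1 else 0) := by
        simp only [pvStepG]
        rw [pvGetD_modify]
        by_cases ha : p.1 = u
        · have hrl : (G.getD u []).length = n := by
            rcases Nat.lt_or_ge u G.length with h | h
            · rw [List.getD_eq_getElem _ _ (by omega)]
              exact hrows _ (List.getElem_mem (by omega))
            · omega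
          rw [if_pos ⟨ha, by omega⟩, pvGetD_modify]
          by_cases hb : p.2 = v
          · rw [if_pos ⟨hb, by omega⟩, if_pos (by rw [← ha, ← hb])]
          · rw [if_neg (by tauto), if_neg (by rintro rfl; exact hb rfl)]
            ring
        · rw [if_neg (by tauto), if_neg (by rintro rfl; exact ha rfl)]
          ring
      rw [he, List.count_cons]
      by_cases hp : p = (u, v) <;> simp [hp] <;> push_cast <;> ring

theorem pvCnt_counter (ps : List (Nat × Nat)) :
    ps.foldl pvStepC PySem.Dict.empty = PySem.Dict.counter (ps.map pvCast) := by
  rw [PySem.Dict.counter_eq_foldl, List.foldl_map]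
  rfl

-- the generic "scatter" lemma: a fold whose every step adds δ p k at position k

theorem pvScatter {α : Type} (n : Nat) (L : List α) (step : List Int → α → List Int)
    (δ : α → Nat → Int)
    (hlen : ∀ w p, p ∈ L → w.length = n → (step w p).length = n)
    (hget : ∀ w p k, p ∈ L → w.length = n → (step w p).getD k 0 = w.getD k 0 + δ p k) :
    ∀ init : List Int, init.length = n →
      (L.foldl step init).length = n ∧
      ∀ k, (L.foldl step init).getD k 0 = init.getD k 0 + (L.map (δ · k)).sum := by
  revert hlen hget
  induction L with
  | nil => intro _ _ init h; simp [h]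
  | cons p t ih =>
      intro hlen hget init h
      have h1 : (step init p).length = n := hlen init p List.mem_cons_self h
      obtain ⟨hl, hg⟩ := ih
        (fun w q hq hw => hlen w q (List.mem_cons_of_mem _ hq) hw)
        (fun w q k hq hw => hget w q k (List.mem_cons_of_mem _ hq) hw)
        (step init p) h1
      refine ⟨by simpa using hl, fun k => ?_⟩
      rw [List.foldl_cons, hg k, hget init p k List.mem_cons_self h]
      simp
      ring


-- A's comparison loop --------------------------------------------------------

theorem pvPyRange_cast (n : Nat) :
    PySem.List.pyRange 0 (n : Int) 1 = List.map (fun k : Nat => (k : Int)) (List.range n) := by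
  rw [PySem.List.pyRange_one]
  have h1 : ((n : Int) - 0).toNat = n := by simp
  rw [h1]
  exact List.map_congr_left (fun k _ => by simp)

theorem pvSum_flatMap {α : Type} (l : List α) (f : α → List Int) :
    (l.flatMap f).sum = (l.map (fun x => (f x).sum)).sum := by
  induction l with
  | nil => rfl
  | cons x t ih => simp [List.flatMap_cons, ih]

theorem pvBt_irrefl (ps : List (Nat × Nat)) (u : Nat) : pvBt ps u u = false := by
  simp [pvBt]

theorem pvBt_asymm (ps : List (Nat × Nat)) (u v : Nat) (h : pvBt ps u v = true) :
    pvBt ps v u = false := by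
  by_cases hc : pvC ps u v = pvC ps v u
  · simp only [pvBt, if_pos hc, if_pos hc.symm] at h ⊢
    simp at h ⊢
    omega
  · have hc' : ¬ (pvC ps v u = pvC ps u v) := fun h' => hc h'.symm
    simp only [pvBt, if_neg hc, if_neg hc'] at h ⊢
    simp at h ⊢
    omega

def pvSq (n : Nat) : List (Nat × Nat) :=
  (List.range n).flatMap (fun u => (List.range n).map (fun v => (u, v)))

def pvAStep (ps : List (Nat × Nat)) (ans : List Int) (q : Nat × Nat) : List Int :=
  if pvBt ps q.1 q.2 then ans.modify q.1 (· + 1)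
  else if pvBt ps q.2 q.1 then ans.modify q.2 (· + 1)
  else ans

def pvDA (ps : List (Nat × Nat)) (q : Nat × Nat) (k : Nat) : Int :=
  if pvBt ps q.1 q.2 then (if q.1 = k then 1 else 0)
  else if pvBt ps q.2 q.1 then (if q.2 = k then 1 else 0)
  else 0

theorem pvMem_sq (n : Nat) (q : Nat × Nat) : q ∈ pvSq n ↔ q.1 < n ∧ q.2 < n := by
  simp only [pvSq, List.mem_flatMap, List.mem_map, List.mem_range]
  constructor
  · rintro ⟨u, hu, v, hv, rfl⟩; exact ⟨hu, hv⟩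
  · rintro ⟨h1, h2⟩; exact ⟨q.1, h1, q.2, h2, rfl⟩

theorem pvABody_eq (ps : List (Nat × Nat)) (n : Nat) (hps : ∀ p ∈ ps, p.1 < n ∧ p.2 < n)
    (u v : Nat) (hu : u < n) (hv : v < n) (ans : List Int) :
    pvABody (ps.foldl pvStepG (List.replicate n (List.replicate n 0)))
            (ps.foldl pvStepZ (List.replicate n 0)) (u : Int) ans (v : Int)
      = pvAStep ps ans (u, v) := by
  have hrows : ∀ r ∈ List.replicate n (List.replicate n (0:Int)), r.length = n := by
    intro r hr; rw [List.eq_of_mem_replicate hr]; simp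
  have e0 : ∀ w, w < n → ((List.replicate n (List.replicate n (0:Int))).getD w []) = List.replicate n 0 := by
    intro w hw
    rw [List.getD_eq_getElem _ _ (by simpa using hw), List.getElem_replicate]
  have z0 : ∀ w, w < n → (List.replicate n (0:Int)).getD w 0 = 0 := by
    intro w hw
    rw [List.getD_eq_getElem _ _ (by simpa using hw), List.getElem_replicate]
  have hGuv : ((ps.foldl pvStepG (List.replicate n (List.replicate n 0))).getD u []).getD v 0
      = (ps.count (u, v) : Int) := by
    rw [pvG_entry ps (List.replicate n (List.replicate n 0)) n (by simp) hrows u v hu hv,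
      e0 u hu, z0 v hv, zero_add]
  have hGvu : ((ps.foldl pvStepG (List.replicate n (List.replicate n 0))).getD v []).getD u 0
      = (ps.count (v, u) : Int) := by
    rw [pvG_entry ps (List.replicate n (List.replicate n 0)) n (by simp) hrows v u hv hu,
      e0 v hv, z0 u hu, zero_add]
  have hZu : (ps.foldl pvStepZ (List.replicate n 0)).getD u 0 = pvD ps u := by
    rw [pvZ_entry ps (List.replicate n 0) n (by simp) hps u hu, z0 u hu, pvD]
    ring
  have hZv : (ps.foldl pvStepZ (List.replicate n 0)).getD v 0 = pvD ps v := by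
    rw [pvZ_entry ps (List.replicate n 0) n (by simp) hps v hv, z0 v hv, pvD]
    ring
  simp only [pvABody, Int.toNat_natCast]
  rw [hGuv, hGvu, hZu, hZv]
  simp only [pvAStep, pvBt, pvC]
  by_cases hc : ps.count (u, v) = ps.count (v, u)
  · have hc' : (ps.count (u, v) : Int) = (ps.count (v, u) : Int) := by exact_mod_cast hc
    simp only [if_pos hc, if_pos hc']
    by_cases h1 : pvD ps v < pvD ps u
    · simp [hc, h1]
    · by_cases h2 : pvD ps u < pvD ps v <;> simp [hc, h1, h2]
  · have hc' : ¬ (ps.count (u, v) : Int) = (ps.count (v, u) : Int) := by exact_mod_cast hc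
    have hcs : ¬ ps.count (v, u) = ps.count (u, v) := fun h => hc h.symm
    simp only [if_neg hc, if_neg hc', if_neg hcs]
    by_cases hlt : ps.count (v, u) < ps.count (u, v)
    · have hlt' : (ps.count (v, u) : Int) < (ps.count (u, v) : Int) := by exact_mod_cast hlt
      simp [hlt, hlt']
    · have hgt : ps.count (u, v) < ps.count (v, u) := by omega
      have hlt' : ¬ (ps.count (v, u) : Int) < (ps.count (u, v) : Int) := by
        push_cast; omega
      simp [hlt, hlt', hgt]


theorem pvDA_split (ps : List (Nat × Nat)) (q : Nat × Nat) (k : Nat) :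
    pvDA ps q k = (if pvBt ps q.1 q.2 ∧ q.1 = k then 1 else 0)
                + (if pvBt ps q.2 q.1 ∧ q.2 = k then 1 else 0) := by
  by_cases h1 : pvBt ps q.1 q.2 = true
  · have h2 := pvBt_asymm ps q.1 q.2 h1
    simp [pvDA, h1, h2]
  · by_cases h2 : pvBt ps q.2 q.1 = true <;> simp [pvDA, h1, h2]

theorem pvSq_sum (ps : List (Nat × Nat)) (n k : Nat) (hk : k < n) :
    ((pvSq n).map (fun q => pvDA ps q k)).sum = 2 * pvW ps n k := by
  rw [pvSq, List.map_flatMap]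
  rw [pvSum_flatMap]
  have hrow : ∀ u, ((List.map (fun q => pvDA ps q k) ((List.range n).map (fun v => (u, v))))).sum
      = (if u = k then pvW ps n k else 0) + (if pvBt ps k u then 1 else 0) := by
    intro u
    rw [List.map_map]
    have : ∀ v, pvDA ps (u, v) k
        = (if u = k then (if pvBt ps u v then 1 else 0) else 0)
        + (if v = k ∧ pvBt ps k u then 1 else 0) := by
      intro v
      rw [pvDA_split]
      by_cases hu : u = k <;> by_cases hv : v = k <;>
        simp [hu, hv, pvBt_irrefl]
    calc ((List.range n).map (fun v => pvDA ps (u, v) k)).sum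
        = ((List.range n).map (fun v =>
            (if u = k then (if pvBt ps u v then 1 else 0) else 0)
            + (if v = k ∧ pvBt ps k u then (1:Int) else 0))).sum := by
          exact congrArg List.sum (List.map_congr_left (fun v _ => this v))
      _ = (∑ v ∈ Finset.range n, (if u = k then (if pvBt ps u v then (1:Int) else 0) else 0))
          + ∑ v ∈ Finset.range n, (if v = k ∧ pvBt ps k u then (1:Int) else 0) := by
          rw [pvSum_range_list]
          rw [Finset.sum_add_distrib]
      _ = (if u = k then pvW ps n k else 0) + (if pvBt ps k u then 1 else 0) := by
          congr 1
          · by_cases hu : u = k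
            · subst hu; simp [pvW]
            · simp [hu]
          · have : ∀ v, (if v = k ∧ pvBt ps k u then (1:Int) else 0)
                = if v = k then (if pvBt ps k u then (1:Int) else 0) else 0 := by
              intro v; by_cases hv : v = k <;> simp [hv]
            rw [Finset.sum_congr rfl (fun v _ => this v), Finset.sum_ite_eq']
            simp [hk]
  calc ((List.range n).map (fun u => (List.map (fun q => pvDA ps q k)
          ((List.range n).map (fun v => (u, v)))).sum)).sum
      = ((List.range n).map (fun u =>
          (if u = k then pvW ps n k else 0) + (if pvBt ps k u then (1:Int) else 0))).sum := by
        exact congrArg List.sum (List.map_congr_left (fun u _ => hrow u))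
    _ = (∑ u ∈ Finset.range n, (if u = k then pvW ps n k else 0))
        + ∑ u ∈ Finset.range n, (if pvBt ps k u then (1:Int) else 0) := by
        rw [pvSum_range_list, Finset.sum_add_distrib]
    _ = 2 * pvW ps n k := by
        rw [Finset.sum_ite_eq']
        simp [hk, pvW]
        ring


theorem pvAStep_getD (ps : List (Nat × Nat)) (n : Nat) (w : List Int) (q : Nat × Nat) (k : Nat)
    (hq : q ∈ pvSq n) (hw : w.length = n) :
    (pvAStep ps w q).getD k 0 = w.getD k 0 + pvDA ps q k := by
  obtain ⟨h1, h2⟩ := (pvMem_sq n q).mp hq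
  simp only [pvAStep, pvDA]
  by_cases b1 : pvBt ps q.1 q.2 = true
  · rw [if_pos b1, if_pos b1, pvGetD_modify]
    by_cases hk : q.1 = k
    · rw [if_pos ⟨hk, by omega⟩, if_pos hk]
    · rw [if_neg (fun hc => hk hc.1), if_neg hk]; ring
  · rw [if_neg b1, if_neg b1]
    by_cases b2 : pvBt ps q.2 q.1 = true
    · rw [if_pos b2, if_pos b2, pvGetD_modify]
      by_cases hk : q.2 = k
      · rw [if_pos ⟨hk, by omega⟩, if_pos hk]
      · rw [if_neg (fun hc => hk hc.1), if_neg hk]; ring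
    · rw [if_neg b2, if_neg b2]; ring

theorem pvA_main (ps : List (Nat × Nat)) (n : Nat) (hps : ∀ p ∈ ps, p.1 < n ∧ p.2 < n) :
    ((PySem.List.pyRange 0 (n : Int) 1).foldl
      (fun a i => (PySem.List.pyRange 0 (n : Int) 1).foldl
        (pvABody (ps.foldl pvStepG (List.replicate n (List.replicate n 0)))
                 (ps.foldl pvStepZ (List.replicate n 0)) i) a)
      (List.replicate n 0)).length = n ∧
    ∀ k, k < n →
      ((PySem.List.pyRange 0 (n : Int) 1).foldl
        (fun a i => (PySem.List.pyRange 0 (n : Int) 1).foldl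
          (pvABody (ps.foldl pvStepG (List.replicate n (List.replicate n 0)))
                   (ps.foldl pvStepZ (List.replicate n 0)) i) a)
        (List.replicate n 0)).getD k 0 = 2 * pvW ps n k := by
  have hrw : ∀ init : List Int,
      (PySem.List.pyRange 0 (n : Int) 1).foldl
        (fun a i => (PySem.List.pyRange 0 (n : Int) 1).foldl
          (pvABody (ps.foldl pvStepG (List.replicate n (List.replicate n 0)))
                   (ps.foldl pvStepZ (List.replicate n 0)) i) a) init
      = (pvSq n).foldl (pvAStep ps) init := by
    intro init
    rw [pvSq, List.foldl_flatMap]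
    simp only [pvPyRange_cast, List.foldl_map]
    apply PySem.List.foldl_congr_mem
    intro acc u hu
    apply PySem.List.foldl_congr_mem
    intro acc' v hv
    exact pvABody_eq ps n hps u v (List.mem_range.mp hu) (List.mem_range.mp hv) acc'
  rw [hrw]
  have hlen : ∀ (w : List Int) (q : Nat × Nat), q ∈ pvSq n → w.length = n →
      (pvAStep ps w q).length = n := by
    intro w q hq hw
    simp only [pvAStep]
    split_ifs <;> simp [hw]
  obtain ⟨hl, hg⟩ := pvScatter n (pvSq n) (pvAStep ps) (pvDA ps) hlen
    (fun w q k hq hw => pvAStep_getD ps n w q k hq hw) (List.replicate n 0) (by simp)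
  refine ⟨hl, fun k hk => ?_⟩
  rw [hg k, pvSq_sum ps n k hk]
  have : (List.replicate n (0:Int)).getD k 0 = 0 := by
    rw [List.getD_eq_getElem _ _ (by simpa using hk)]; simp
  rw [this, zero_add]


-- B's rank computation -------------------------------------------------------

theorem pvFirst_frozen (l : List Int) (s0 : Int) (d0 : PySem.Dict Int Int) (v : Int)
    (h : d0.contains v = true) :
    ((PySem.List.enumerate l s0).foldl
      (fun first p => if first.contains p.2 then first else first.insert p.2 p.1) d0).getD v 0
      = d0.getD v 0 := by
  induction l generalizing s0 d0 with
  | nil => simp [PySem.List.enumerate_nil]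
  | cons x t ih =>
      rw [PySem.List.enumerate_cons]
      simp only [List.foldl_cons]
      by_cases hx : d0.contains x = true
      · rw [if_pos hx, ih _ _ h]
      · rw [if_neg hx]
        have hxv : x ≠ v := fun he => hx (he ▸ h)
        rw [ih _ _ (by rw [PySem.Dict.contains_insert]; simp [h]),
          PySem.Dict.getD_insert_of_ne _ _ _ (fun he => hxv he.symm)]

theorem pvFirst_getD (l : List Int) (hs : l.Pairwise (· ≤ ·)) (s0 : Int)
    (d0 : PySem.Dict Int Int) (v : Int) (hv : v ∈ l) (hd : d0.contains v = false) :
    ((PySem.List.enumerate l s0).foldl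
      (fun first p => if first.contains p.2 then first else first.insert p.2 p.1) d0).getD v 0
      = s0 + (l.countP (fun x => decide (x < v)) : Int) := by
  induction l generalizing s0 d0 with
  | nil => cases hv
  | cons x t ih =>
      have hx : ∀ y ∈ t, x ≤ y := fun y hy => List.rel_of_pairwise_cons hs hy
      rw [PySem.List.enumerate_cons]
      simp only [List.foldl_cons]
      by_cases hxv : x = v
      · subst hxv
        rw [if_neg (by simp [hd])]
        have hcnt : t.countP (fun y => decide (y < x)) = 0 :=
          List.countP_eq_zero.mpr (fun y hy => by simpa using not_lt.mpr (hx y hy))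
        rw [pvFirst_frozen t (s0 + 1) _ x
          (by rw [PySem.Dict.contains_insert]; simp),
          PySem.Dict.getD_insert_self]
        rw [List.countP_cons]
        simp [hcnt]
      · have hvt : v ∈ t := by
          rcases List.mem_cons.mp hv with h1 | h2
          · exact absurd h1.symm hxv
          · exact h2
        have hxlt : x < v := lt_of_le_of_ne (hx v hvt) hxv
        have step_pres : ∀ d1 : PySem.Dict Int Int, d1 =
            (if d0.contains x = true then d0 else d0.insert x s0) → d1.contains v = false := by
          intro d1 h1
          by_cases hc : d0.contains x = true
          · rw [h1, if_pos hc]; exact hd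
          · rw [h1, if_neg hc, PySem.Dict.contains_insert]
            have : ¬ v = x := fun h => hxv h.symm
            simp [hd, this]
        rw [ih hs.of_cons (s0 + 1) _ hvt (step_pres _ rfl)]
        rw [List.countP_cons]
        simp [hxlt]
        push_cast
        ring

-- Set.ofList commutes with the injective pvCast ------------------------------

theorem pvOfList_map_aux (ps : List (Nat × Nat)) :
    ∀ s : PySem.Set (Nat × Nat),
      (ps.map pvCast).foldl PySem.Set.add (s.map pvCast) = (ps.foldl PySem.Set.add s).map pvCast := by
  induction ps with
  | nil => intro s; simp
  | cons p t ih =>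
      intro s
      simp only [List.map_cons, List.foldl_cons]
      have hadd : PySem.Set.add (s.map pvCast) (pvCast p) = (PySem.Set.add s p).map pvCast := by
        simp only [PySem.Set.add]
        have hc : PySem.Set.contains (s.map pvCast) (pvCast p) = PySem.Set.contains s p := by
          by_cases hm : p ∈ s
          · rw [(PySem.Set.contains_iff s p).mpr hm,
              (PySem.Set.contains_iff (s.map pvCast) (pvCast p)).mpr (List.mem_map_of_mem hm)]
          · have h2 : pvCast p ∉ s.map pvCast := by
              intro hmm
              obtain ⟨q, hq, he⟩ := List.mem_map.mp hmm
              exact hm (pvCast_inj he ▸ hq)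
            rw [Bool.eq_iff_iff.mpr ⟨fun h => absurd ((PySem.Set.contains_iff _ _).mp h) h2,
              fun h => absurd ((PySem.Set.contains_iff _ _).mp h) hm⟩]
        rw [hc]
        by_cases hm : p ∈ s <;> simp [hm]
      rw [hadd, ih]

theorem pvOfList_map (ps : List (Nat × Nat)) :
    PySem.Set.ofList (ps.map pvCast) = (PySem.Set.ofList ps).map pvCast := by
  have h1 := PySem.Set.ofList_eq_foldl (ps.map pvCast)
  have h2 := PySem.Set.ofList_eq_foldl ps
  rw [h1, h2]
  have := pvOfList_map_aux ps ([] : PySem.Set (Nat × Nat))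
  simpa using this


-- assembled facts about Z (gift indices) and cnt (pair counter) ---------------

theorem pvZ_getD (ps : List (Nat × Nat)) (n : Nat) (hps : ∀ p ∈ ps, p.1 < n ∧ p.2 < n)
    (m : Nat) (hm : m < n) :
    (ps.foldl pvStepZ (List.replicate n 0)).getD m 0 = pvD ps m := by
  rw [pvZ_entry ps (List.replicate n 0) n (by simp) hps m hm,
    List.getD_eq_getElem _ _ (by simpa using hm), List.getElem_replicate, pvD]
  ring

theorem pvZ_eq_map (ps : List (Nat × Nat)) (n : Nat) (hps : ∀ p ∈ ps, p.1 < n ∧ p.2 < n) :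
    ps.foldl pvStepZ (List.replicate n 0) = (List.range n).map (pvD ps) := by
  apply List.ext_getElem
  · rw [pvZ_len]; simp
  · intro i h1 h2
    have hin : i < n := by simpa using h2
    have := pvZ_getD ps n hps i hin
    rw [List.getD_eq_getElem _ _ h1] at this
    rw [this, List.getElem_map, List.getElem_range]

theorem pvCnt_getD (ps : List (Nat × Nat)) (a b : Nat) :
    (ps.foldl pvStepC PySem.Dict.empty).getD ((a : Int), (b : Int)) 0 = (ps.count (a, b) : Int) := by
  rw [pvCnt_counter, PySem.Dict.getD_counter]
  have h : ((a : Int), (b : Int)) = pvCast (a, b) := rfl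
  rw [h, List.count_map_of_injective ps pvCast pvCast_inj]

theorem pvCnt_contains (ps : List (Nat × Nat)) (a b : Nat) :
    (ps.foldl pvStepC PySem.Dict.empty).contains ((a : Int), (b : Int)) = true ↔ (a, b) ∈ ps := by
  rw [pvCnt_counter, PySem.Dict.contains_counter, List.contains_iff_mem]
  constructor
  · intro h
    obtain ⟨q, hq, he⟩ := List.mem_map.mp h
    exact (pvCast_inj he : q = (a, b)) ▸ hq
  · intro h
    exact List.mem_map_of_mem (f := pvCast) h

theorem pvModify_getD (w : List Int) (n : Nat) (hw : w.length = n) (i : Nat) (hi : i < n)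
    (f : Int → Int) (k : Nat) :
    (w.modify i f).getD k 0 = if i = k then f (w.getD k 0) else w.getD k 0 := by
  rw [pvGetD_modify]
  by_cases e : i = k
  · rw [if_pos ⟨e, by omega⟩, if_pos e]
  · rw [if_neg (fun c => e c.1), if_neg e]

-- B's correction step adds exactly pvDB at every position ---------------------

theorem pvCorr_len (Z : List Int) (cnt : PySem.Dict (Int × Int) Int) (w : List Int)
    (p : Int × Int) : (pvCorr Z cnt w p).length = w.length := by
  simp only [pvCorr]
  split_ifs <;> simp

theorem pvCorr_getD (ps : List (Nat × Nat)) (n : Nat) (hps : ∀ p ∈ ps, p.1 < n ∧ p.2 < n)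
    (w : List Int) (p : Int × Int) (k : Nat)
    (hp : p ∈ (PySem.Set.ofList ps).map pvCast) (hw : w.length = n) :
    (pvCorr (ps.foldl pvStepZ (List.replicate n 0)) (ps.foldl pvStepC PySem.Dict.empty) w p).getD k 0
      = w.getD k 0 + pvDB ps p.1.toNat p.2.toNat k := by
  obtain ⟨q, hq, rfl⟩ := List.mem_map.mp hp
  have hqps : q ∈ ps := (PySem.Set.mem_ofList ps q).mp hq
  obtain ⟨hu, hv⟩ := hps q hqps
  have c1 : (pvCast q).1 = (q.1 : Int) := rfl
  have c2 : (pvCast q).2 = (q.2 : Int) := rfl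
  simp only [pvCorr, c1, c2, Int.toNat_natCast]
  by_cases hg : q.2 < q.1 ∧ (q.2, q.1) ∈ ps
  · rw [if_pos ⟨by exact_mod_cast hg.1, (pvCnt_contains ps q.2 q.1).mpr hg.2⟩,
      pvDB, if_pos hg]
    ring
  · have hg' : ¬ ((q.2 : Int) < (q.1 : Int) ∧
        (ps.foldl pvStepC PySem.Dict.empty).contains ((q.2 : Int), (q.1 : Int)) = true) := by
      intro hcon
      exact hg ⟨by exact_mod_cast hcon.1, (pvCnt_contains ps q.2 q.1).mp hcon.2⟩
    rw [if_neg hg', pvCnt_getD ps q.1 q.2, pvCnt_getD ps q.2 q.1, pvDB, if_neg hg]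
    by_cases hcc : pvC ps q.1 q.2 = pvC ps q.2 q.1
    · have hcc' : ¬ ((ps.count (q.1, q.2) : Int) ≠ (ps.count (q.2, q.1) : Int)) := by
        simp only [pvC] at hcc
        push_cast
        omega
      rw [if_neg hcc', if_pos hcc]
      ring
    · have hne : q.1 ≠ q.2 := by
        intro he
        exact hcc (by rw [he])
      have hcc' : (ps.count (q.1, q.2) : Int) ≠ (ps.count (q.2, q.1) : Int) := by
        simp only [pvC] at hcc
        push_cast
        omega
      rw [if_pos hcc', if_neg hcc]
      rw [pvZ_getD ps n hps q.1 hu, pvZ_getD ps n hps q.2 hv]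
      have hlen1 : ∀ j : Nat, (w.modify j (· - 1)).length = n := by
        intro j; simp [hw]
      by_cases hd1 : pvD ps q.2 < pvD ps q.1
      · rw [if_pos hd1, if_pos hd1]
        by_cases hp1 : (ps.count (q.2, q.1) : Int) < (ps.count (q.1, q.2) : Int)
        · have hp1' : pvC ps q.2 q.1 < pvC ps q.1 q.2 := by
            simp only [pvC]; exact_mod_cast hp1
          rw [if_pos hp1, if_pos hp1',
            pvModify_getD _ n (hlen1 q.1) q.1 hu _ k, pvModify_getD w n hw q.1 hu _ k]
          by_cases e1 : q.1 = k <;> simp [e1] <;> ring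
        · have hp1' : ¬ pvC ps q.2 q.1 < pvC ps q.1 q.2 := by
            simp only [pvC]; exact_mod_cast hp1
          rw [if_neg hp1, if_neg hp1',
            pvModify_getD _ n (hlen1 q.1) q.2 hv _ k, pvModify_getD w n hw q.1 hu _ k]
          by_cases e1 : q.1 = k <;> by_cases e2 : q.2 = k <;>
            simp [e1, e2, fun h : q.1 = q.2 => hne h] <;> first | ring | omega
      · rw [if_neg hd1, if_neg hd1]
        by_cases hd2 : pvD ps q.1 < pvD ps q.2
        · rw [if_pos hd2, if_pos hd2]
          by_cases hp1 : (ps.count (q.2, q.1) : Int) < (ps.count (q.1, q.2) : Int)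
          · have hp1' : pvC ps q.2 q.1 < pvC ps q.1 q.2 := by
              simp only [pvC]; exact_mod_cast hp1
            rw [if_pos hp1, if_pos hp1',
              pvModify_getD _ n (hlen1 q.2) q.1 hu _ k, pvModify_getD w n hw q.2 hv _ k]
            by_cases e1 : q.1 = k <;> by_cases e2 : q.2 = k <;>
              simp [e1, e2, fun h : q.1 = q.2 => hne h] <;> first | ring | omega
          · have hp1' : ¬ pvC ps q.2 q.1 < pvC ps q.1 q.2 := by
              simp only [pvC]; exact_mod_cast hp1
            rw [if_neg hp1, if_neg hp1',
              pvModify_getD _ n (hlen1 q.2) q.2 hv _ k, pvModify_getD w n hw q.2 hv _ k]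
            by_cases e2 : q.2 = k <;> simp [e2] <;> ring
        · rw [if_neg hd2, if_neg hd2]
          by_cases hp1 : (ps.count (q.2, q.1) : Int) < (ps.count (q.1, q.2) : Int)
          · have hp1' : pvC ps q.2 q.1 < pvC ps q.1 q.2 := by
              simp only [pvC]; exact_mod_cast hp1
            rw [if_pos hp1, if_pos hp1', pvModify_getD w n hw q.1 hu _ k]
            by_cases e1 : q.1 = k <;> simp [e1] <;> ring
          · have hp1' : ¬ pvC ps q.2 q.1 < pvC ps q.1 q.2 := by
              simp only [pvC]; exact_mod_cast hp1
            rw [if_neg hp1, if_neg hp1', pvModify_getD w n hw q.2 hv _ k]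
            by_cases e2 : q.2 = k <;> simp [e2] <;> ring


-- pairing the processed counter keys with the corrected opponents -------------

theorem pvDB_ne (ps : List (Nat × Nat)) (u v k : Nat) (h : pvDB ps u v k ≠ 0) :
    ¬ (v < u ∧ (v, u) ∈ ps) ∧ pvC ps u v ≠ pvC ps v u ∧ (u = k ∨ v = k) := by
  by_cases hg : v < u ∧ (v, u) ∈ ps
  · exact absurd (by simp [pvDB, hg]) h
  · by_cases hcc : pvC ps u v = pvC ps v u
    · exact absurd (by simp [pvDB, hg, hcc]) h
    · refine ⟨hg, hcc, ?_⟩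
      by_contra hn
      push_neg at hn
      exact h (by simp [pvDB, hg, hcc, hn.1, hn.2])

theorem pvDB_val1 (ps : List (Nat × Nat)) (v k : Nat)
    (hg : ¬ (v < k ∧ (v, k) ∈ ps)) (hcc : pvC ps k v ≠ pvC ps v k) :
    pvDB ps k v k = pvDelta ps k v := by
  have hvk : v ≠ k := fun he => hcc (by rw [he])
  simp only [pvDB, pvDelta, if_neg hg, if_neg hcc]
  by_cases h1 : pvC ps v k < pvC ps k v <;>
    by_cases h2 : pvD ps v < pvD ps k <;>
      by_cases h3 : pvD ps k < pvD ps v <;>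
        simp [h1, h2, h3, hvk]

theorem pvDB_val2 (ps : List (Nat × Nat)) (u k : Nat)
    (hg : ¬ (k < u ∧ (k, u) ∈ ps)) (hcc : pvC ps u k ≠ pvC ps k u) (huk : u ≠ k) :
    pvDB ps u k k = pvDelta ps k u := by
  have hcc' : pvC ps k u ≠ pvC ps u k := fun he => hcc he.symm
  simp only [pvDB, pvDelta, if_neg hg, if_neg hcc, if_neg hcc']
  have ht : ∀ a b : Nat, a ≠ b → (¬ a < b) → b < a := by intro a b h1 h2; omega
  by_cases h1 : pvC ps k u < pvC ps u k
  · have h1' : ¬ pvC ps u k < pvC ps k u := by omega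
    by_cases h2 : pvD ps k < pvD ps u <;> by_cases h3 : pvD ps u < pvD ps k <;>
      simp [h1, h1', h2, h3, huk] <;> omega
  · have h1' : pvC ps u k < pvC ps k u := ht _ _ hcc' h1
    by_cases h2 : pvD ps k < pvD ps u <;> by_cases h3 : pvD ps u < pvD ps k <;>
      simp [h1, h1', h2, h3, huk] <;> omega

theorem pvDelta_ne (ps : List (Nat × Nat)) (k j : Nat) (h : pvDelta ps k j ≠ 0) :
    pvC ps k j ≠ pvC ps j k := by
  by_cases hcc : pvC ps k j = pvC ps j k
  · exact absurd (by simp [pvDelta, hcc]) h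
  · exact hcc

theorem pvMem_of_ccne (ps : List (Nat × Nat)) (k j : Nat) (h : pvC ps k j ≠ pvC ps j k) :
    (k, j) ∈ ps ∨ (j, k) ∈ ps := by
  by_cases h1 : (k, j) ∈ ps
  · exact Or.inl h1
  · by_cases h2 : (j, k) ∈ ps
    · exact Or.inr h2
    · exfalso
      have c1 : ps.count (k, j) = 0 := by
        by_contra hc
        exact h1 (List.count_pos_iff.mp (by omega))
      have c2 : ps.count (j, k) = 0 := by
        by_contra hc
        exact h2 (List.count_pos_iff.mp (by omega))
      exact h (by simp [pvC, c1, c2])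

def pvRep (ps : List (Nat × Nat)) (k j : Nat) : Nat × Nat :=
  if k < j then (if (k, j) ∈ ps then (k, j) else (j, k))
  else (if (j, k) ∈ ps then (j, k) else (k, j))

theorem pvRep_spec (ps : List (Nat × Nat)) (k j : Nat) (hcj : pvC ps k j ≠ pvC ps j k) :
    pvRep ps k j ∈ ps ∧ pvDB ps (pvRep ps k j).1 (pvRep ps k j).2 k = pvDelta ps k j ∧
    (if (pvRep ps k j).1 = k then (pvRep ps k j).2 else (pvRep ps k j).1) = j := by
  have hjk : j ≠ k := fun he => hcj (by rw [he])
  have hcj' : pvC ps j k ≠ pvC ps k j := fun he => hcj he.symm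
  have hmem := pvMem_of_ccne ps k j hcj
  unfold pvRep
  by_cases hlt : k < j
  · rw [if_pos hlt]
    by_cases h1 : (k, j) ∈ ps
    · rw [if_pos h1]
      exact ⟨h1, pvDB_val1 ps j k (fun hh => absurd hh.1 (by omega)) hcj, by simp⟩
    · rw [if_neg h1]
      have h2 : (j, k) ∈ ps := hmem.resolve_left h1
      refine ⟨h2, pvDB_val2 ps j k (fun hh => h1 hh.2) hcj' hjk, by simp [hjk]⟩
  · rw [if_neg hlt]
    have hgt : j < k := by omega
    by_cases h1 : (j, k) ∈ ps
    · rw [if_pos h1]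
      exact ⟨h1, pvDB_val2 ps j k (fun hh => absurd hh.1 (by omega)) hcj' hjk, by simp [hjk]⟩
    · rw [if_neg h1]
      have h2 : (k, j) ∈ ps := hmem.resolve_right h1
      exact ⟨h2, pvDB_val1 ps j k (fun hh => h1 hh.2) hcj, by simp⟩

theorem pvRep_of_mem (ps : List (Nat × Nat)) (k : Nat) (q : Nat × Nat) (hq : q ∈ ps)
    (hne : pvDB ps q.1 q.2 k ≠ 0) :
    pvRep ps k (if q.1 = k then q.2 else q.1) = q := by
  obtain ⟨hg, hcc, htouch⟩ := pvDB_ne ps q.1 q.2 k hne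
  have hq' : (q.1, q.2) ∈ ps := by simpa using hq
  rcases htouch with h1 | h2
  · rw [if_pos h1]
    have hv : q.2 ≠ k := fun he => hcc (by rw [h1, he])
    unfold pvRep
    by_cases hlt : k < q.2
    · rw [if_pos hlt, if_pos (by rw [← h1]; exact hq')]
      exact Prod.ext h1.symm rfl
    · rw [if_neg hlt]
      have hn : ¬ (q.2, k) ∈ ps := by
        intro hin
        exact hg ⟨by omega, by rw [h1]; exact hin⟩
      rw [if_neg hn]
      exact Prod.ext h1.symm rfl
  · by_cases h1 : q.1 = k
    · rw [if_pos h1]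
      have hv : q.2 ≠ k := fun he => hcc (by rw [h1, he])
      unfold pvRep
      by_cases hlt : k < q.2
      · rw [if_pos hlt, if_pos (by rw [← h1]; exact hq')]
        exact Prod.ext h1.symm rfl
      · rw [if_neg hlt]
        have hn : ¬ (q.2, k) ∈ ps := by
          intro hin
          exact hg ⟨by omega, by rw [h1]; exact hin⟩
        rw [if_neg hn]
        exact Prod.ext h1.symm rfl
    · rw [if_neg h1]
      unfold pvRep
      by_cases hlt : k < q.1
      · rw [if_pos hlt]
        have hn : ¬ (k, q.1) ∈ ps := by
          intro hin
          exact hg ⟨by omega, by rw [h2]; exact hin⟩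
        rw [if_neg hn]
        exact Prod.ext rfl h2.symm
      · rw [if_neg hlt, if_pos (by rw [← h2]; exact hq')]
        exact Prod.ext rfl h2.symm

theorem pvKeySum (ps : List (Nat × Nat)) (n k : Nat) (hps : ∀ p ∈ ps, p.1 < n ∧ p.2 < n)
    (hk : k < n) :
    (((PySem.Set.ofList ps).map pvCast).map (fun p => pvDB ps p.1.toNat p.2.toNat k)).sum
      = ∑ j ∈ Finset.range n, pvDelta ps k j := by
  rw [List.map_map]
  have he : ((PySem.Set.ofList ps).map ((fun p : Int × Int => pvDB ps p.1.toNat p.2.toNat k) ∘ pvCast))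
      = ((PySem.Set.ofList ps).map (fun q => pvDB ps q.1 q.2 k)) :=
    List.map_congr_left (fun q _ => by simp [pvCast])
  rw [he, ← List.sum_toFinset _ (PySem.Set.nodup_ofList ps),
    ← Finset.sum_filter_ne_zero ((PySem.Set.ofList ps).toFinset),
    ← Finset.sum_filter_ne_zero (Finset.range n)]
  have hmemS : ∀ q : Nat × Nat, q ∈ (PySem.Set.ofList ps).toFinset ↔ q ∈ ps := by
    intro q
    rw [List.mem_toFinset, PySem.Set.mem_ofList]
  refine Finset.sum_bij' (fun q _ => if q.1 = k then q.2 else q.1)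
    (fun j _ => pvRep ps k j) ?_ ?_ ?_ ?_ ?_
  · intro q hq
    rw [Finset.mem_filter] at hq
    obtain ⟨hqS, hqne⟩ := hq
    have hqps := (hmemS q).mp hqS
    obtain ⟨hg, hcc, htouch⟩ := pvDB_ne ps q.1 q.2 k hqne
    obtain ⟨hu, hv⟩ := hps q hqps
    rw [Finset.mem_filter]
    have hrep := pvRep_of_mem ps k q hqps hqne
    constructor
    · rw [Finset.mem_range]
      by_cases h1 : q.1 = k <;> simp [h1] <;> omega
    · have hcj : pvC ps k (if q.1 = k then q.2 else q.1) ≠ pvC ps (if q.1 = k then q.2 else q.1) k := by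
        by_cases h1 : q.1 = k
        · simp only [if_pos h1]
          rw [← h1]
          exact hcc
        · simp only [if_neg h1]
          have h2 : q.2 = k := htouch.resolve_left h1
          rw [← h2]
          exact fun hh => hcc hh.symm
      obtain ⟨_, hval, _⟩ := pvRep_spec ps k _ hcj
      rw [hrep] at hval
      rw [← hval]
      exact hqne
  · intro j hj
    rw [Finset.mem_filter] at hj
    obtain ⟨hjr, hjne⟩ := hj
    have hcj := pvDelta_ne ps k j hjne
    obtain ⟨hmem, hval, _⟩ := pvRep_spec ps k j hcj
    rw [Finset.mem_filter]
    exact ⟨(hmemS _).mpr hmem, by rw [hval]; exact hjne⟩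
  · intro q hq
    rw [Finset.mem_filter] at hq
    exact pvRep_of_mem ps k q ((hmemS q).mp hq.1) hq.2
  · intro j hj
    rw [Finset.mem_filter] at hj
    have hcj := pvDelta_ne ps k j hj.2
    exact (pvRep_spec ps k j hcj).2.2
  · intro q hq
    rw [Finset.mem_filter] at hq
    have hqps := (hmemS q).mp hq.1
    have hcj : pvC ps k (if q.1 = k then q.2 else q.1) ≠ pvC ps (if q.1 = k then q.2 else q.1) k := by
      obtain ⟨hg, hcc, htouch⟩ := pvDB_ne ps q.1 q.2 k hq.2
      by_cases h1 : q.1 = k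
      · simp only [if_pos h1]
        rw [← h1]
        exact hcc
      · simp only [if_neg h1]
        have h2 : q.2 = k := htouch.resolve_left h1
        rw [← h2]
        exact fun hh => hcc hh.symm
    obtain ⟨_, hval, _⟩ := pvRep_spec ps k _ hcj
    rw [pvRep_of_mem ps k q hqps hq.2] at hval
    exact hval


-- the per-opponent accounting identity ----------------------------------------

theorem pvPointwise (ps : List (Nat × Nat)) (k j : Nat) :
    (if pvBt ps k j then (1 : Int) else 0)
      = (if pvD ps j < pvD ps k then 1 else 0) + pvDelta ps k j := by
  by_cases hcc : pvC ps k j = pvC ps j k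
  · simp [pvBt, pvDelta, hcc]
  · by_cases h1 : pvC ps j k < pvC ps k j <;> by_cases h2 : pvD ps j < pvD ps k <;>
      simp [pvBt, pvDelta, hcc, h1, h2]

theorem pvCountP_int (n : Nat) (p : Nat → Bool) :
    ((List.range n).countP p : Int) = ∑ j ∈ Finset.range n, (if p j then (1 : Int) else 0) := by
  rw [← pvSum_range_list, PySem.List.sum_map_ite_one_zero]

-- B's whole pipeline computes the win counts ----------------------------------

theorem pvB_main (ps : List (Nat × Nat)) (n : Nat) (hps : ∀ p ∈ ps, p.1 < n ∧ p.2 < n) :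
    (ps.foldl pvStepC PySem.Dict.empty).keys.foldl
      (pvCorr (ps.foldl pvStepZ (List.replicate n 0)) (ps.foldl pvStepC PySem.Dict.empty))
      ((PySem.List.pyRange 0 (n : Int) 1).map
        (fun i => (pvFirst (PySem.List.sorted (ps.foldl pvStepZ (List.replicate n 0)) (fun x => x))).getD
          ((ps.foldl pvStepZ (List.replicate n 0)).getD i.toNat 0) 0))
      = (List.range n).map (fun k => pvW ps n k) := by
  have hbase : (PySem.List.pyRange 0 (n : Int) 1).map
        (fun i => (pvFirst (PySem.List.sorted (ps.foldl pvStepZ (List.replicate n 0)) (fun x => x))).getD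
          ((ps.foldl pvStepZ (List.replicate n 0)).getD i.toNat 0) 0)
      = (List.range n).map (fun u => pvBase ps n u) := by
    rw [pvPyRange_cast, List.map_map]
    apply List.map_congr_left
    intro u hu
    have hun : u < n := List.mem_range.mp hu
    have hZu : (ps.foldl pvStepZ (List.replicate n 0)).getD ((u : Int)).toNat 0 = pvD ps u := by
      rw [Int.toNat_natCast]
      exact pvZ_getD ps n hps u hun
    have hpw : (PySem.List.sorted (ps.foldl pvStepZ (List.replicate n 0)) (fun x => x)).Pairwise (· ≤ ·) := by
      have := PySem.List.sorted_pairwise (ps.foldl pvStepZ (List.replicate n 0)) (fun x : Int => x)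
      simpa using this
    have hmem : pvD ps u ∈ PySem.List.sorted (ps.foldl pvStepZ (List.replicate n 0)) (fun x => x) := by
      rw [PySem.List.mem_sorted, pvZ_eq_map ps n hps]
      exact List.mem_map_of_mem (List.mem_range.mpr hun)
    have hfirst := pvFirst_getD _ hpw 0 PySem.Dict.empty (pvD ps u) hmem
      (PySem.Dict.contains_empty _)
    simp only [Function.comp_apply, hZu, pvFirst]
    rw [hfirst, zero_add]
    have hcp : (PySem.List.sorted (ps.foldl pvStepZ (List.replicate n 0)) (fun x : Int => x)).countP
          (fun x => decide (x < pvD ps u))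
        = (List.range n).countP (fun j => decide (pvD ps j < pvD ps u)) := by
      rw [List.Perm.countP_eq _ (PySem.List.sorted_perm (ps.foldl pvStepZ (List.replicate n 0)) (fun x : Int => x) false),
        pvZ_eq_map ps n hps, List.countP_map]
      rfl
    rw [hcp, pvCountP_int, pvBase]
    simp
  have hkeys : (ps.foldl pvStepC PySem.Dict.empty).keys = (PySem.Set.ofList ps).map pvCast := by
    rw [pvCnt_counter, PySem.Dict.keys_counter, pvOfList_map]
  rw [hbase, hkeys]
  have hlen0 : ((List.range n).map (fun u => pvBase ps n u)).length = n := by simp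
  obtain ⟨hlF, hgF⟩ := pvScatter n ((PySem.Set.ofList ps).map pvCast)
    (pvCorr (ps.foldl pvStepZ (List.replicate n 0)) (ps.foldl pvStepC PySem.Dict.empty))
    (fun p k => pvDB ps p.1.toNat p.2.toNat k)
    (fun w p hp hw => by rw [pvCorr_len]; exact hw)
    (fun w p k hp hw => pvCorr_getD ps n hps w p k hp hw)
    ((List.range n).map (fun u => pvBase ps n u)) hlen0
  apply List.ext_getElem
  · rw [hlF]; simp
  · intro i h1 h2
    have hin : i < n := by simpa using h2
    rw [← List.getD_eq_getElem _ 0 h1, ← List.getD_eq_getElem _ 0 h2, hgF i]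
    rw [List.getD_eq_getElem _ 0 h2, List.getElem_map, List.getElem_range]
    have hb : ((List.range n).map (fun u => pvBase ps n u)).getD i 0 = pvBase ps n i := by
      rw [List.getD_eq_getElem _ 0 (by simpa using hin), List.getElem_map, List.getElem_range]
    rw [hb, pvKeySum ps n i hps hin, pvW, pvBase]
    rw [Finset.sum_congr rfl (fun j _ => pvPointwise ps i j), Finset.sum_add_distrib]

-- max of the doubled list is double the max ----------------------------------

theorem pvMax_double (n : Nat) (hn : 0 < n) (f : Nat → Int) :
    PySem.List.max? ((List.range n).map (fun k => 2 * f k)) (fun x => x)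
      = (PySem.List.max? ((List.range n).map f) (fun x => x)).map (fun m => 2 * m) := by
  have hne1 : (List.range n).map f ≠ [] := by simp; omega
  have hne2 : (List.range n).map (fun k => 2 * f k) ≠ [] := by simp; omega
  rcases h1 : PySem.List.max? ((List.range n).map f) (fun x => x) with _ | m
  · exact absurd ((PySem.List.max?_eq_none_iff _ _).mp h1) hne1
  rcases h2 : PySem.List.max? ((List.range n).map (fun k => 2 * f k)) (fun x => x) with _ | ma
  · exact absurd ((PySem.List.max?_eq_none_iff _ _).mp h2) hne2
  have hmm := PySem.List.max?_mem h1
  have hma := PySem.List.max?_mem h2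
  obtain ⟨k1, hk1, he1⟩ := List.mem_map.mp hmm
  obtain ⟨k2, hk2, he2⟩ := List.mem_map.mp hma
  have hle1 : ma ≤ 2 * m := by
    have := PySem.List.max?_isMax h1 (f k2) (List.mem_map_of_mem hk2)
    simp only at this
    omega
  have hle2 : 2 * m ≤ ma := by
    have := PySem.List.max?_isMax h2 (2 * f k1) (List.mem_map_of_mem hk1)
    simp only at this
    omega
  simp only [Option.map_some]
  congr 1
  omega

-- ===== VERDICT (by name: the statement is the Claim_ definition above) =====
theorem solution_spec : Claim_equal_solution := by
  intro friends gifts hdom hpre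
  obtain ⟨hne, hp⟩ := hpre
  have hn : 0 < friends.length := List.length_pos_iff.mpr hne
  have hps := pvPairs_lt friends gifts hp
  obtain ⟨hlA, hgA⟩ := pvA_main (pvPairs friends gifts) friends.length hps
  have hansA : (PySem.List.pyRange 0 (friends.length : Int) 1).foldl
      (fun a i => (PySem.List.pyRange 0 (friends.length : Int) 1).foldl
        (pvABody ((pvPairs friends gifts).foldl pvStepG
            (List.replicate friends.length (List.replicate friends.length 0)))
          ((pvPairs friends gifts).foldl pvStepZ (List.replicate friends.length 0)) i) a)
      (List.replicate friends.length 0)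
      = (List.range friends.length).map
          (fun k => 2 * pvW (pvPairs friends gifts) friends.length k) := by
    apply List.ext_getElem
    · rw [hlA]; simp
    · intro i h1 h2
      have hin : i < friends.length := by simpa using h2
      rw [← List.getD_eq_getElem _ 0 h1, hgA i hin, List.getElem_map, List.getElem_range]
  unfold Spec_solution
  simp only [solution, solution_alt]
  rw [pvAGift_fold friends gifts hp, pvBGift_fold friends gifts hp,
    PySem.List.foldl_prod_mk (f := pvStepG) (g := pvStepZ),
    PySem.List.foldl_prod_mk (f := pvStepZ) (g := pvStepC)]
  simp only [hansA, pvB_main (pvPairs friends gifts) friends.length hps]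
  rw [pvMax_double friends.length hn (pvW (pvPairs friends gifts) friends.length)]
  rcases hm : PySem.List.max? ((List.range friends.length).map
      (pvW (pvPairs friends gifts) friends.length)) (fun x => x) with _ | m
  · simp
  · have hfd : PySem.Int.floordiv (2 * m) 2 = m :=
      (PySem.Int.floordiv_eq_iff_of_pos (by omega)).mpr (by constructor <;> omega)
    simp [hfd]
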